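-- pv_equiv track=rewrite | github.com/24733725/Skripsie-Micromouse-Code | PythonSimulation/FF8.py | detect_diagonals
-- ===== SOURCE A (Python) =====
-- def get_mid_direction(a , b):
--     if (a==0 and b ==2) or (a==2 and b ==0): return 1
--     if (a==2 and b ==4) or (a==4 and b ==2): return 3
--     if (a==4 and b ==6) or (a==6 and b ==4): return 5
--     if (a==6 and b ==0) or (a==0 and b ==6): return 7
--
-- def detect_diagonals(paths):
--     alldirs = []
--     alldists = []
--     for path in paths:
--         tempdir = []
--         tempdist = []
--         le = len(path)
--         j = 0
--         while (j < le ):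
--             diag_flag = 0
--             diag = []
--             hcounts = 2
--             diag.append(path[j])
--             if j < le - 2  :
--                 if (path[j] == path[j+2]) and not (path[j]==path[j+1]):
--                     diag_flag = 1
--                     diag.append(path[j+1])
--                     diag.append(path[j+2])
--                     i = j+3
--                     while (i < le):
--                         if (path[i] == path[i-2]):
--                             hcounts += 1
--                             diag.append(path[i])
--                             i += 1
--                         else:
--                             break
--             if (diag_flag == 0):
--                 tempdir.append(path[j])
--                 tempdist.append(2)
--                 j += 1
--             else:
--                 tempdir.append(diag[0])
--                 tempdist.append(1)
--                 tempdir.append(get_mid_direction(int(diag[0]), int(diag[1])))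
--                 tempdist.append(hcounts)
--                 tempdir.append(diag[-1])
--                 tempdist.append(1)
--                 j += hcounts + 1
--             # log(diag)
--         alldirs.append(tempdir)
--         alldists.append(tempdist)
--     return alldirs, alldists
-- ===== SOURCE B (Python) =====
-- def get_mid_direction(a , b):
--     if (a==0 and b ==2) or (a==2 and b ==0): return 1
--     if (a==2 and b ==4) or (a==4 and b ==2): return 3
--     if (a==4 and b ==6) or (a==6 and b ==4): return 5
--     if (a==6 and b ==0) or (a==0 and b ==6): return 7
--
-- def _encode(path):
--     # Structural recursion on suffixes.  A diagonal is the longest prefix of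
--     # path matching the fixed alternation a, b, a, b, ... (a = path[0],
--     # b = path[1]); no running buffer, flag or two-back comparison is kept.
--     if len(path) >= 3 and path[0] == path[2] and path[0] != path[1]:
--         a, b = path[0], path[1]
--         k = 3
--         while k < len(path) and path[k] == (a if k % 2 == 0 else b):
--             k += 1
--         dirs, dists = _encode(path[k:])
--         return ([a, get_mid_direction(a, b), path[k - 1]] + dirs,
--                 [1, k - 1, 1] + dists)
--     if path:
--         dirs, dists = _encode(path[1:])
--         return [path[0]] + dirs, [2] + dists
--     return [], []
--
-- def detect_diagonals(paths):
--     encoded = [_encode(path) for path in paths]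
--     return [d for d, _ in encoded], [s for _, s in encoded]
-- ===== Notes on version B (the rewrite author's own statement) =====
-- stated objective: alternative
-- what changed: B replaces A's index-based while loop with its diag buffer, diag_flag and compare-two-back extension by structural recursion on path suffixes: a diagonal is recognised as the longest prefix matching the fixed alternation a,b,a,b,... by parity, outputs are built front-to-back by list concatenation, and the per-path results are unzipped with comprehensions.
-- outside the precondition, e.g. on detect_diagonals([[0, 4, 0]]): A returns ([[0, None, 0]], [[1, 2, 1]]), B returns ([[0, None, 0]], [[1, 2, 1]])
import Mathlib
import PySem

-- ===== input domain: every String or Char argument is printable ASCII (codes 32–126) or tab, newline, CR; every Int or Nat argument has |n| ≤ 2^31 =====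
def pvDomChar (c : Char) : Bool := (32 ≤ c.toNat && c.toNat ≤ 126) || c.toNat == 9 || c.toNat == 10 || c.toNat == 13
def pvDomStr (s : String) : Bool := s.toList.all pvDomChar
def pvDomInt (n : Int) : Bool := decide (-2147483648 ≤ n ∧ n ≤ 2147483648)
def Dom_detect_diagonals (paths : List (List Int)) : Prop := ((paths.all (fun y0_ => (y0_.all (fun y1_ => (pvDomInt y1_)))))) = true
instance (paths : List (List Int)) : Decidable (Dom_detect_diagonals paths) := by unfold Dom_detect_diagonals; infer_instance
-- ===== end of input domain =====

-- B replaces A's index-based while loop (diag buffer, diag_flag, compare-two-back extension)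
-- by structural recursion on path suffixes: a diagonal is the longest prefix matching the
-- fixed alternation a, b, a, b, ... by parity; outputs are built front-to-back; per-path
-- results are unzipped with comprehensions.  Same asymptotic cost (objective: alternative).
-- Loops are ported with an explicit fuel parameter (always called with enough fuel), which
-- only makes the recursion structural and changes no computed value.
-- Python's get_mid_direction returns None on unlisted pairs; Pre_ excludes the inputs where
-- that None would reach the output (the ports encode that unreachable None as 0).

-- ===== PORT A =====
-- get_mid_direction: Python returns an int or (implicitly) None -> Option Int
def get_mid_direction (a b : Int) : Option Int :=
  if (a = 0 ∧ b = 2) ∨ (a = 2 ∧ b = 0) then some 1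
  else if (a = 2 ∧ b = 4) ∨ (a = 4 ∧ b = 2) then some 3
  else if (a = 4 ∧ b = 6) ∨ (a = 6 ∧ b = 4) then some 5
  else if (a = 6 ∧ b = 0) ∨ (a = 0 ∧ b = 6) then some 7
  else none

-- A's inner `while i < le` extension loop; state (diag, hcounts, i).
-- All indices are guarded in range, so `getD … 0` is exact for Python's path[i].
def pvAExt (path : List Int) (le : Nat) (fuel : Nat) (diag : List Int) (hcounts i : Nat) :
    List Int × Nat × Nat :=
  match fuel with
  | 0 => (diag, hcounts, i)
  | fuel + 1 =>
    if i < le then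
      if path.getD i 0 = path.getD (i - 2) 0 then
        pvAExt path le fuel (diag ++ [path.getD i 0]) (hcounts + 1) (i + 1)
      else (diag, hcounts, i)
    else (diag, hcounts, i)

-- A's outer `while j < le` loop (diag_flag folded into the branch, as in the source's control flow).
def pvALoop (path : List Int) (le : Nat) (fuel : Nat) (j : Nat) (tempdir tempdist : List Int) :
    List Int × List Int :=
  match fuel with
  | 0 => (tempdir, tempdist)
  | fuel + 1 =>
    if j < le then
      if j < le - 2 ∧ path.getD j 0 = path.getD (j + 2) 0 ∧ ¬ path.getD j 0 = path.getD (j + 1) 0 then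
        let r := pvAExt path le (le - (j + 3))
          [path.getD j 0, path.getD (j + 1) 0, path.getD (j + 2) 0] 2 (j + 3)
        pvALoop path le fuel (j + r.2.1 + 1)
          (tempdir ++ [r.1.headD 0, (get_mid_direction (r.1.headD 0) (r.1.getD 1 0)).getD 0, r.1.getLastD 0])
          (tempdist ++ [1, (r.2.1 : Int), 1])
      else
        pvALoop path le fuel (j + 1) (tempdir ++ [path.getD j 0]) (tempdist ++ [2])
    else (tempdir, tempdist)

def detect_diagonals (paths : List (List Int)) : List (List Int) × List (List Int) :=
  paths.foldl
    (fun acc path =>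
      let r := pvALoop path path.length path.length 0 [] []
      (acc.1 ++ [r.1], acc.2 ++ [r.2]))
    ([], [])

-- ===== PORT B =====
-- Source B's inner `while k < len(path) and path[k] == (a if k % 2 == 0 else b)` loop: final k.
def pvAltLen (path : List Int) (fuel : Nat) (a b : Int) (k : Nat) : Nat :=
  match fuel with
  | 0 => k
  | fuel + 1 =>
    if k < path.length ∧ path.getD k 0 = (if k % 2 = 0 then a else b) then
      pvAltLen path fuel a b (k + 1)
    else k

-- Source B's _encode: structural recursion on suffixes, building (dirs, dists) front-to-back.
def pvEncode (fuel : Nat) (path : List Int) : List Int × List Int :=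
  match fuel with
  | 0 => ([], [])
  | fuel + 1 =>
    if 3 ≤ path.length ∧ path.getD 0 0 = path.getD 2 0 ∧ path.getD 0 0 ≠ path.getD 1 0 then
      let a := path.getD 0 0
      let b := path.getD 1 0
      let k := pvAltLen path (path.length - 3) a b 3
      let r := pvEncode fuel (path.drop k)
      (a :: (get_mid_direction a b).getD 0 :: path.getD (k - 1) 0 :: r.1,
       1 :: ((k : Int) - 1) :: 1 :: r.2)
    else if path.isEmpty then ([], [])
    else
      let r := pvEncode fuel path.tail
      (path.headD 0 :: r.1, 2 :: r.2)

-- Source B's detect_diagonals: encode each path, then unzip with comprehensions.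
def detect_diagonals_alt (paths : List (List Int)) : List (List Int) × List (List Int) :=
  let encoded := paths.map (fun path => pvEncode path.length path)
  (encoded.map Prod.fst, encoded.map Prod.snd)

-- ===== PRECONDITION & SPEC =====
def pvValidMid (a b : Int) : Bool :=
  (a == 0 && b == 2) || (a == 2 && b == 0) || (a == 2 && b == 4) || (a == 4 && b == 2) ||
  (a == 4 && b == 6) || (a == 6 && b == 4) || (a == 6 && b == 0) || (a == 0 && b == 6)

-- Pre_ excludes inputs on which Python's get_mid_direction returns None and A places that None
-- inside the returned list, which is not an int (the output then leaves the declared type).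
-- It quantifies over every position that looks like a diagonal start, which is slightly
-- conservative: a few inputs whose only such position is skipped by the scan are excluded too
-- (both programs still agree there; see cites).
def Pre_detect_diagonals (paths : List (List Int)) : Prop :=
  ∀ path ∈ paths, ∀ k < path.length, k + 2 < path.length →
    path.getD k 0 = path.getD (k + 2) 0 → path.getD k 0 ≠ path.getD (k + 1) 0 →
    pvValidMid (path.getD k 0) (path.getD (k + 1) 0) = true

instance (paths : List (List Int)) : Decidable (Pre_detect_diagonals paths) := by
  unfold Pre_detect_diagonals; infer_instance

def pvWitness_detect_diagonals : List (List Int) := [[0, 2, 0, 2], [3, 3], []]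

def Spec_detect_diagonals (paths : List (List Int)) (out : List (List Int) × List (List Int)) : Prop :=
  out = detect_diagonals_alt paths
instance (paths : List (List Int)) (out : List (List Int) × List (List Int)) :
    Decidable (Spec_detect_diagonals paths out) := by unfold Spec_detect_diagonals; infer_instance

-- ===== CLAIM (what is proved, stated in full; the proofs are below) =====
def Claim_equal_detect_diagonals : Prop :=
  ∀ (paths : List (List Int)), Dom_detect_diagonals paths → Pre_detect_diagonals paths →
    Spec_detect_diagonals paths (detect_diagonals paths)

-- ===== LEMMAS AND PROOFS =====

-- Proof-side skeleton of A's extension loop: only the advancing index.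
def pvScan (path : List Int) (n i : Nat) : Nat :=
  if _h : i < n then
    if path.getD i 0 = path.getD (i - 2) 0 then pvScan path n (i + 1) else i
  else i
termination_by n - i

theorem pvScan_ge (path : List Int) (n i : Nat) : i ≤ pvScan path n i := by
  fun_induction pvScan path n i <;> omega

-- A's extension loop in terms of pvScan: final index, count, and the accumulated diag buffer.
theorem pvAExt_eq (path : List Int) (n : Nat) :
    ∀ fuel diag h i, n - i ≤ fuel →
      pvAExt path n fuel diag h i =
        (diag ++ (List.range' i (pvScan path n i - i)).map (fun k => path.getD k 0),
         h + (pvScan path n i - i), pvScan path n i) := by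
  intro fuel
  induction fuel with
  | zero =>
    intro diag h i hf
    have hni : ¬ i < n := by omega
    have hs : pvScan path n i = i := by rw [pvScan, dif_neg hni]
    simp [pvAExt, hs]
  | succ fuel ih =>
    intro diag h i hf
    by_cases hi : i < n
    · by_cases hc : path.getD i 0 = path.getD (i - 2) 0
      · have hstep : pvScan path n i = pvScan path n (i + 1) := by
          rw [pvScan, dif_pos hi, if_pos hc]
        have hge := pvScan_ge path n (i + 1)
        rw [pvAExt, if_pos hi, if_pos hc, ih _ _ _ (by omega), hstep]
        have hm : pvScan path n (i + 1) - i = (pvScan path n (i + 1) - (i + 1)) + 1 := by omega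
        rw [hm, List.range'_succ]
        simp
        omega
      · have hs : pvScan path n i = i := by rw [pvScan, dif_pos hi, if_neg hc]
        rw [pvAExt, if_pos hi, if_neg hc, hs]
        simp
    · have hs : pvScan path n i = i := by rw [pvScan, dif_neg hi]
      rw [pvAExt, if_neg hi, hs]
      simp

theorem pvGetD_drop (l : List Int) (i m : Nat) :
    (l.drop i).getD m 0 = l.getD (i + m) 0 := by
  simp [List.getD_eq_getElem?_getD, List.getElem?_drop]

-- pvScan from j+k equals j + B's alternation-prefix length from k, under the invariant that
-- path[j..j+k) already follows the alternation a, b, a, b, ...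
theorem pvScan_altLen (path : List Int) (j : Nat) (a b : Int) :
    ∀ fuel k, (path.drop j).length - k ≤ fuel → 3 ≤ k →
      (∀ m, m < k → path.getD (j + m) 0 = (if m % 2 = 0 then a else b)) →
      pvScan path path.length (j + k) = j + pvAltLen (path.drop j) fuel a b k := by
  intro fuel
  induction fuel with
  | zero =>
    intro k hf _ _
    have h1 : ¬ j + k < path.length := by
      simp only [List.length_drop] at hf; omega
    rw [pvScan, dif_neg h1, pvAltLen]
  | succ fuel ih =>
    intro k hf hk3 hinv
    by_cases hlt : j + k < path.length
    · have hcond : (path.getD (j + k) 0 = path.getD (j + k - 2) 0) ↔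
          ((path.drop j).getD k 0 = (if k % 2 = 0 then a else b)) := by
        have e1 : (path.drop j).getD k 0 = path.getD (j + k) 0 := pvGetD_drop path j k
        have e2 : j + k - 2 = j + (k - 2) := by omega
        have e3 : path.getD (j + (k - 2)) 0 = (if (k - 2) % 2 = 0 then a else b) :=
          hinv (k - 2) (by omega)
        have e4 : (k - 2) % 2 = k % 2 := by omega
        rw [e1, e2, e3, e4]
      by_cases hc : path.getD (j + k) 0 = path.getD (j + k - 2) 0
      · have hcB : k < (path.drop j).length ∧
            (path.drop j).getD k 0 = (if k % 2 = 0 then a else b) := by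
          refine ⟨by simp only [List.length_drop]; omega, hcond.mp hc⟩
        rw [pvScan, dif_pos hlt, if_pos hc, pvAltLen, if_pos hcB]
        have hj1 : j + k + 1 = j + (k + 1) := by omega
        rw [hj1]
        refine ih (k + 1) (by simp only [List.length_drop] at hf ⊢; omega) (by omega) ?_
        intro m hm
        by_cases hmk : m < k
        · exact hinv m hmk
        · have hmeq : m = k := by omega
          subst hmeq
          have := pvGetD_drop path j m
          rw [← this, hcB.2]
      · have hcB : ¬ (k < (path.drop j).length ∧
            (path.drop j).getD k 0 = (if k % 2 = 0 then a else b)) := by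
          intro hh; exact hc (hcond.mpr hh.2)
        rw [pvScan, dif_pos hlt, if_neg hc, pvAltLen, if_neg hcB]
    · have hcB : ¬ (k < (path.drop j).length ∧
          (path.drop j).getD k 0 = (if k % 2 = 0 then a else b)) := by
        simp only [List.length_drop]; omega
      rw [pvScan, dif_neg hlt, pvAltLen, if_neg hcB]

-- pvEncode's unfolding equations.
theorem pvEncode_nil (fuel : Nat) : pvEncode fuel [] = ([], []) := by
  cases fuel <;> simp [pvEncode]

theorem pvEncode_single (g : Nat) (x : Int) (rest : List Int)
    (h : ¬ (3 ≤ (x :: rest).length ∧ (x :: rest).getD 0 0 = (x :: rest).getD 2 0 ∧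
        (x :: rest).getD 0 0 ≠ (x :: rest).getD 1 0)) :
    pvEncode (g + 1) (x :: rest) = (x :: (pvEncode g rest).1, 2 :: (pvEncode g rest).2) := by
  rw [pvEncode, if_neg h]
  rfl

theorem pvEncode_diag (g : Nat) (path : List Int)
    (h : 3 ≤ path.length ∧ path.getD 0 0 = path.getD 2 0 ∧ path.getD 0 0 ≠ path.getD 1 0) :
    pvEncode (g + 1) path =
      (path.getD 0 0 ::
          (get_mid_direction (path.getD 0 0) (path.getD 1 0)).getD 0 ::
          path.getD (pvAltLen path (path.length - 3) (path.getD 0 0) (path.getD 1 0) 3 - 1) 0 ::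
          (pvEncode g (path.drop (pvAltLen path (path.length - 3) (path.getD 0 0) (path.getD 1 0) 3))).1,
       1 :: ((pvAltLen path (path.length - 3) (path.getD 0 0) (path.getD 1 0) 3 : Int) - 1) :: 1 ::
          (pvEncode g (path.drop (pvAltLen path (path.length - 3) (path.getD 0 0) (path.getD 1 0) 3))).2) := by
  rw [pvEncode, if_pos h]

-- Main loop lemma: A's outer loop at index j computes B's encoding of the suffix.
theorem pvALoop_encode (path : List Int) :
    ∀ fuelA j d s fuelB, path.length - j ≤ fuelA → path.length - j ≤ fuelB →
      pvALoop path path.length fuelA j d s =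
        (d ++ (pvEncode fuelB (path.drop j)).1, s ++ (pvEncode fuelB (path.drop j)).2) := by
  intro fuelA
  induction fuelA with
  | zero =>
    intro j d s fuelB hA hB
    have hdrop : path.drop j = [] := List.drop_eq_nil_of_le (by omega)
    rw [pvALoop, hdrop, pvEncode_nil]
    simp
  | succ fuelA ih =>
    intro j d s fuelB hA hB
    by_cases hj : j < path.length
    · obtain ⟨g, rfl⟩ : ∃ g, fuelB = g + 1 := ⟨fuelB - 1, by omega⟩
      by_cases hc : j < path.length - 2 ∧ path.getD j 0 = path.getD (j + 2) 0 ∧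
          ¬ path.getD j 0 = path.getD (j + 1) 0
      · obtain ⟨hj2, heq02, hne01⟩ := hc
        have hge : j + 3 ≤ pvScan path path.length (j + 3) := pvScan_ge path path.length (j + 3)
        -- abbreviations (plain haves; no `set`, to keep omega's atoms aligned)
        have hdB : 3 ≤ (path.drop j).length ∧
            (path.drop j).getD 0 0 = (path.drop j).getD 2 0 ∧
            (path.drop j).getD 0 0 ≠ (path.drop j).getD 1 0 := by
          refine ⟨by simp only [List.length_drop]; omega, ?_, ?_⟩
          · rw [pvGetD_drop, pvGetD_drop]; simpa using heq02
          · rw [pvGetD_drop, pvGetD_drop]; simpa using hne01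
        have hg0 : (path.drop j).getD 0 0 = path.getD j 0 := by
          rw [pvGetD_drop]
          simp
        have hg1 : (path.drop j).getD 1 0 = path.getD (j + 1) 0 := by
          rw [pvGetD_drop]
        have hinv3 : ∀ m, m < 3 →
            path.getD (j + m) 0 = (if m % 2 = 0 then path.getD j 0 else path.getD (j + 1) 0) := by
          intro m hm
          interval_cases m
          · simp
          · simp
          · simpa using heq02.symm
        have hK : pvAltLen (path.drop j) ((path.drop j).length - 3)
              (path.getD j 0) (path.getD (j + 1) 0) 3 = pvScan path path.length (j + 3) - j := by
          have hsa := pvScan_altLen path j (path.getD j 0) (path.getD (j + 1) 0)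
            ((path.drop j).length - 3) 3 (le_refl _) (by omega) hinv3
          omega
        -- components of A's extension-loop result via pvAExt_eq
        have hr : pvAExt path path.length (path.length - (j + 3))
              [path.getD j 0, path.getD (j + 1) 0, path.getD (j + 2) 0] 2 (j + 3) =
            ([path.getD j 0, path.getD (j + 1) 0, path.getD (j + 2) 0] ++
              (List.range' (j + 3) (pvScan path path.length (j + 3) - (j + 3))).map
                (fun k => path.getD k 0),
             2 + (pvScan path path.length (j + 3) - (j + 3)), pvScan path path.length (j + 3)) :=
          pvAExt_eq path path.length (path.length - (j + 3)) _ 2 (j + 3) (le_refl _)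
        rw [pvALoop, if_pos hj, if_pos ⟨hj2, heq02, hne01⟩]
        simp only [hr]
        have h3 : ([path.getD j 0, path.getD (j + 1) 0, path.getD (j + 2) 0] ++
            (List.range' (j + 3) (pvScan path path.length (j + 3) - (j + 3))).map
              (fun k => path.getD k 0)).getLastD 0 =
            path.getD (pvScan path path.length (j + 3) - 1) 0 := by
          rcases Nat.eq_zero_or_pos (pvScan path path.length (j + 3) - (j + 3)) with h0 | h0
          · have hej : pvScan path path.length (j + 3) - 1 = j + 2 := by omega
            simp [h0, hej]
          · obtain ⟨m, hm⟩ : ∃ m, pvScan path path.length (j + 3) - (j + 3) = m + 1 :=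
              ⟨pvScan path path.length (j + 3) - (j + 3) - 1, by omega⟩
            have hlast : j + 3 + 1 * m = pvScan path path.length (j + 3) - 1 := by omega
            rw [hm, List.range'_concat, hlast, List.map_append, List.map_cons, List.map_nil,
              ← List.append_assoc, List.getLastD_concat]
        have h6 : ((2 + (pvScan path path.length (j + 3) - (j + 3)) : Nat) : Int) =
            ((pvScan path path.length (j + 3) - j : Nat) : Int) - 1 := by
          omega
        have h5 : j + (2 + (pvScan path path.length (j + 3) - (j + 3))) + 1 =
            pvScan path path.length (j + 3) := by
          omega
        simp only [h3, h6, h5]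
        rw [ih (pvScan path path.length (j + 3)) _ _ g (by omega) (by omega)]
        rw [pvEncode_diag g (path.drop j) hdB, hg0, hg1]
        rw [hK]
        have hdd : (path.drop j).drop (pvScan path path.length (j + 3) - j) =
            path.drop (pvScan path path.length (j + 3)) := by
          rw [List.drop_drop]; congr 1; omega
        have hgd : (path.drop j).getD (pvScan path path.length (j + 3) - j - 1) 0 =
            path.getD (pvScan path path.length (j + 3) - 1) 0 := by
          rw [pvGetD_drop]; congr 1; omega
        rw [hdd, hgd]
        simp
      · -- single step
        have hdrop : path.drop j = path.getD j 0 :: path.drop (j + 1) := by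
          rw [List.drop_eq_getElem_cons hj]
          congr 1
          simp [List.getD_eq_getElem?_getD, List.getElem?_eq_getElem hj]
        have hcB : ¬ (3 ≤ (path.getD j 0 :: path.drop (j + 1)).length ∧
            (path.getD j 0 :: path.drop (j + 1)).getD 0 0 =
              (path.getD j 0 :: path.drop (j + 1)).getD 2 0 ∧
            (path.getD j 0 :: path.drop (j + 1)).getD 0 0 ≠
              (path.getD j 0 :: path.drop (j + 1)).getD 1 0) := by
          rw [← hdrop]
          intro ⟨hl, hq, hne⟩
          apply hc
          refine ⟨by simp only [List.length_drop] at hl; omega, ?_, ?_⟩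
          · have := hq; rw [pvGetD_drop, pvGetD_drop] at this; simpa using this
          · have := hne; rw [pvGetD_drop, pvGetD_drop] at this; simpa using this
        rw [pvALoop, if_pos hj, if_neg hc, ih (j + 1) _ _ g (by omega) (by omega),
          hdrop, pvEncode_single g _ _ hcB]
        simp
    · have hdrop : path.drop j = [] := List.drop_eq_nil_of_le (by omega)
      rw [pvALoop, if_neg hj, hdrop, pvEncode_nil]
      simp

-- Outer fold: A's foldl with append-accumulators equals B's map-and-unzip.
theorem pvFold_unzip (paths : List (List Int)) : ∀ (u v : List (List Int)),
    paths.foldl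
      (fun acc path =>
        let r := pvALoop path path.length path.length 0 [] []
        (acc.1 ++ [r.1], acc.2 ++ [r.2]))
      (u, v) =
    (u ++ (paths.map (fun path => pvEncode path.length path)).map Prod.fst,
     v ++ (paths.map (fun path => pvEncode path.length path)).map Prod.snd) := by
  induction paths with
  | nil => intro u v; simp
  | cons p ps ih =>
    intro u v
    simp only [List.foldl_cons, List.map_cons]
    rw [ih]
    have hp : pvALoop p p.length p.length 0 [] [] =
        ((pvEncode p.length p).1, (pvEncode p.length p).2) := by
      have := pvALoop_encode p p.length 0 [] [] p.length (by omega) (by omega)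
      simpa using this
    rw [hp]
    simp

-- ===== VERDICT (by name: the statement is the Claim_ definition above) =====
theorem detect_diagonals_spec : Claim_equal_detect_diagonals := by
  intro paths _ _
  unfold Spec_detect_diagonals detect_diagonals detect_diagonals_alt
  rw [pvFold_unzip paths [] []]
  simp
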